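-- pv_equiv track=rewrite | github.com/gus2427/Term-Project-V3 | IntensityTransform.py | CreateGmap
-- ===== SOURCE A (Python) =====
-- def CreateGmap(lst):
--     result_dict = {}
--
--     pos=-1
--     while pos < len(lst)-1:
--         pos+=1
--         entry=lst[pos]
--         j=pos
--         while(j+1<len(lst)) and (entry == lst[j+1]): # makes sure elements are unique in the dictionary
--             j+=1
--
--         if j!=pos:
--             result_dict[entry] = j//2 # if there are multiple instantces store the center one as the output
--         else:
--             result_dict[entry] = j
--
--         pos=j
--
--     return result_dict
-- ===== SOURCE B (Python) =====
-- def CreateGmap(lst):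
--     n = len(lst)
--     starts = [i for i in range(n) if i == 0 or lst[i - 1] != lst[i]]
--     ends = [i for i in range(n) if i == n - 1 or lst[i] != lst[i + 1]]
--     result_dict = {}
--     for s, e in zip(starts, ends):
--         result_dict[lst[s]] = s if s == e else e // 2
--     return result_dict
-- ===== Notes on version B (the rewrite author's own statement) =====
-- stated objective: alternative
-- what changed: Replaced A's nested while loops (inner scan finding each run's end, outer index jump) by three staged passes: one comprehension collecting all run-start indices, an independent comprehension collecting all run-end indices, and a zip of the two lists folded into the dict.
import Mathlib
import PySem

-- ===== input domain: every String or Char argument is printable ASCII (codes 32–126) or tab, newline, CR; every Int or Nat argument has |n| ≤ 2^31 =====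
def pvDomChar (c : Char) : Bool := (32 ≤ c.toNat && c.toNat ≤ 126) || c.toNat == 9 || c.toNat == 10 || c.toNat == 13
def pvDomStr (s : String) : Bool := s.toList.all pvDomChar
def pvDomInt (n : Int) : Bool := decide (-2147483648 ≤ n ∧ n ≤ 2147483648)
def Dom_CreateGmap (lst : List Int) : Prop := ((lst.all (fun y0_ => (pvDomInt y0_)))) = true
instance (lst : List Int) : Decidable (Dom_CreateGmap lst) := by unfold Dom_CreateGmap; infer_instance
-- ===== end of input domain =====

-- B replaces A's nested while loops by three staged passes: a comprehension of run-start
-- indices, an independent comprehension of run-end indices, and a zip folded into the dict;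
-- objective: an alternative decomposition of the same O(n) task.

-- ===== PORT A =====
-- inner while loop: advance j while lst[j+1] == entry (indices stay in range, so getD is exact)
def pvRunEnd (lst : List Int) (entry : Int) (j : Nat) : Nat :=
  if h : j + 1 < lst.length ∧ lst.getD (j + 1) 0 = entry then pvRunEnd lst entry (j + 1) else j
termination_by lst.length - j
decreasing_by omega

theorem pvRunEnd_ge (lst : List Int) (entry : Int) (j : Nat) : j ≤ pvRunEnd lst entry j := by
  fun_induction pvRunEnd <;> omega

-- outer while loop; pos here is Python's pos+1 (the index about to be processed), so the
-- guard 'pos < len(lst)-1' before the increment becomes 'pos < len(lst)'.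
-- j//2 on the nonnegative index j is Nat division, exactly Python's floor division.
def pvLoopA (lst : List Int) (d : PySem.Dict Int Int) (pos : Nat) : PySem.Dict Int Int :=
  if h : pos < lst.length then
    let entry := lst.getD pos 0
    let j := pvRunEnd lst entry pos
    pvLoopA lst (d.insert entry (if j ≠ pos then ((j / 2 : Nat) : Int) else (j : Int))) (j + 1)
  else d
termination_by lst.length - pos
decreasing_by have := pvRunEnd_ge lst (lst.getD pos 0) pos; omega

def CreateGmap (lst : List Int) : List (Int × Int) :=
  (pvLoopA lst PySem.Dict.empty 0).items

-- ===== PORT B =====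
-- the two comprehension filters of Source B ('i == 0 or lst[i-1] != lst[i]', 'i == n-1 or lst[i] != lst[i+1]')
def pvStartP (lst : List Int) (i : Int) : Bool :=
  i == 0 || !(PySem.List.pyGetD lst (i - 1) 0 == PySem.List.pyGetD lst i 0)

def pvEndP (lst : List Int) (i : Int) : Bool :=
  i == (lst.length : Int) - 1 || !(PySem.List.pyGetD lst i 0 == PySem.List.pyGetD lst (i + 1) 0)

-- the dict-building loop 'for s, e in zip(starts, ends): result_dict[lst[s]] = s if s == e else e // 2'
def pvStepB (lst : List Int) (d : PySem.Dict Int Int) (se : Int × Int) : PySem.Dict Int Int :=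
  d.insert (PySem.List.pyGetD lst se.1 0) (if se.1 == se.2 then se.1 else PySem.Int.floordiv se.2 2)

def CreateGmap_alt (lst : List Int) : List (Int × Int) :=
  let starts := (PySem.List.pyRange 0 (lst.length : Int) 1).filter (pvStartP lst)
  let ends := (PySem.List.pyRange 0 (lst.length : Int) 1).filter (pvEndP lst)
  ((starts.zip ends).foldl (pvStepB lst) PySem.Dict.empty).items

-- ===== PRECONDITION & SPEC =====
def Spec_CreateGmap (lst : List Int) (out : List (Int × Int)) : Prop := out = CreateGmap_alt lst
instance (lst : List Int) (out : List (Int × Int)) : Decidable (Spec_CreateGmap lst out) := by unfold Spec_CreateGmap; infer_instance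

-- ===== CLAIM (what is proved, stated in full; the proofs are below) =====
def Claim_equal_CreateGmap : Prop := ∀ (lst : List Int), Dom_CreateGmap lst → Spec_CreateGmap lst (CreateGmap lst)

-- ===== LEMMAS AND PROOFS =====

theorem pvRunEnd_lt (lst : List Int) (entry : Int) (j : Nat) (h : j < lst.length) :
    pvRunEnd lst entry j < lst.length := by
  fun_induction pvRunEnd <;> simp_all

theorem pvRunEnd_stop (lst : List Int) (entry : Int) (j : Nat) :
    ¬ (pvRunEnd lst entry j + 1 < lst.length ∧ lst.getD (pvRunEnd lst entry j + 1) 0 = entry) := by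
  fun_induction pvRunEnd <;> simp_all

theorem pvRunEnd_run (lst : List Int) (entry : Int) (j : Nat) (hj : lst.getD j 0 = entry) :
    ∀ i, j ≤ i → i ≤ pvRunEnd lst entry j → lst.getD i 0 = entry := by
  fun_induction pvRunEnd with
  | case1 j h ih =>
    intro i h1 h2
    rcases Nat.eq_or_lt_of_le h1 with rfl | hlt
    · exact hj
    · exact ih h.2 i hlt h2
  | case2 j h =>
    intro i h1 h2
    have : i = j := le_antisymm h2 h1
    simpa [this] using hj

-- value at an in-run Int index
theorem pvGetD_int (lst : List Int) (x : Int) (hx0 : 0 ≤ x) (hxl : x < (lst.length : Int)) :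
    PySem.List.pyGetD lst x 0 = lst.getD x.toNat 0 := by
  rw [PySem.List.pyGetD_eq_getElem lst 0 hx0 hxl]
  rw [List.getD_eq_getElem?_getD, List.getElem?_eq_getElem (by omega : x.toNat < lst.length)]
  rfl

-- the run segment [pos, j] contributes exactly [pos] to starts
theorem pvStartsSeg (lst : List Int) (entry : Int) (pos : Nat) (hpos : pos < lst.length)
    (hentry : lst.getD pos 0 = entry) (hstart : pvStartP lst (pos : Int) = true) :
    ((PySem.List.pyRange (pos : Int) ((pvRunEnd lst entry pos : Nat) + 1) 1).filter (pvStartP lst))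
      = [(pos : Int)] := by
  set j := pvRunEnd lst entry pos with hjdef
  have hjge : pos ≤ j := pvRunEnd_ge lst entry pos
  have hjlt : j < lst.length := pvRunEnd_lt lst entry pos hpos
  rw [PySem.List.pyRange_one_cons (by exact_mod_cast Nat.lt_succ_of_le hjge)]
  rw [List.filter_cons_of_pos hstart]
  congr 1
  rw [List.filter_eq_nil_iff]
  intro x hx
  rw [PySem.List.mem_pyRange_one] at hx
  have hx0 : (0 : Int) < x := by omega
  have hxl : x < (lst.length : Int) := by
    have : ((j : Nat) : Int) + 1 ≤ (lst.length : Int) := by exact_mod_cast hjlt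
    omega
  have h1 : PySem.List.pyGetD lst (x - 1) 0 = entry := by
    rw [pvGetD_int lst (x - 1) (by omega) (by omega)]
    exact pvRunEnd_run lst entry pos hentry (x - 1).toNat (by omega) (by omega)
  have h2 : PySem.List.pyGetD lst x 0 = entry := by
    rw [pvGetD_int lst x (by omega) hxl]
    exact pvRunEnd_run lst entry pos hentry x.toNat (by omega) (by omega)
  simp [pvStartP, h1, h2]
  omega

-- the run segment [pos, j] contributes exactly [j] to ends
theorem pvEndsSeg (lst : List Int) (entry : Int) (pos : Nat) (hpos : pos < lst.length)
    (hentry : lst.getD pos 0 = entry) :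
    ((PySem.List.pyRange (pos : Int) ((pvRunEnd lst entry pos : Nat) + 1) 1).filter (pvEndP lst))
      = [((pvRunEnd lst entry pos : Nat) : Int)] := by
  set j := pvRunEnd lst entry pos with hjdef
  have hjge : pos ≤ j := pvRunEnd_ge lst entry pos
  have hjlt : j < lst.length := pvRunEnd_lt lst entry pos hpos
  have hstop := pvRunEnd_stop lst entry pos
  rw [← hjdef] at hstop
  rw [PySem.List.pyRange_one_succ_right (by exact_mod_cast hjge)]
  rw [List.filter_append]
  have hendj : pvEndP lst ((j : Nat) : Int) = true := by
    by_cases hlen : j + 1 = lst.length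
    · have hj1 : ((j : Nat) : Int) == (lst.length : Int) - 1 := by
        simp only [beq_iff_eq]
        omega
      simp only [pvEndP, hj1, Bool.true_or]
    · have hlt : j + 1 < lst.length := by omega
      have hne : lst.getD (j + 1) 0 ≠ entry := fun hc => hstop ⟨hlt, hc⟩
      have hj' : lst.getD j 0 = entry := pvRunEnd_run lst entry pos hentry j hjge (le_refl _)
      have e1 : PySem.List.pyGetD lst ((j : Nat) : Int) 0 = entry := by
        rw [pvGetD_int lst _ (by omega) (by exact_mod_cast hjlt)]
        simpa using hj'
      have e2 : PySem.List.pyGetD lst (((j : Nat) : Int) + 1) 0 = lst.getD (j + 1) 0 := by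
        rw [pvGetD_int lst _ (by omega) (by exact_mod_cast hlt)]
        congr 1
      simp only [pvEndP, Bool.or_eq_true, Bool.not_eq_true', beq_eq_false_iff_ne, ne_eq, e1, e2]
      exact Or.inr (fun hc => hne hc.symm)
  rw [List.filter_cons_of_pos hendj, List.filter_nil]
  have hnil : (PySem.List.pyRange (pos : Int) ((j : Nat) : Int) 1).filter (pvEndP lst) = [] := by
    rw [List.filter_eq_nil_iff]
    intro x hx
    rw [PySem.List.mem_pyRange_one] at hx
    have hx0 : (0 : Int) ≤ x := by omega
    have hxl : x < (lst.length : Int) := by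
      have : ((j : Nat) : Int) ≤ (lst.length : Int) := by exact_mod_cast le_of_lt hjlt
      omega
    have h1 : PySem.List.pyGetD lst x 0 = entry := by
      rw [pvGetD_int lst x hx0 hxl]
      exact pvRunEnd_run lst entry pos hentry x.toNat (by omega) (by omega)
    have h2 : PySem.List.pyGetD lst (x + 1) 0 = entry := by
      rw [pvGetD_int lst (x + 1) (by omega) (by
        have : ((j : Nat) : Int) < (lst.length : Int) := by exact_mod_cast hjlt
        omega)]
      exact pvRunEnd_run lst entry pos hentry (x + 1).toNat (by omega) (by omega)
    simp [pvEndP, h1, h2]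
    have : ((j : Nat) : Int) ≤ (lst.length : Int) - 1 := by
      have : ((j : Nat) : Int) < (lst.length : Int) := by exact_mod_cast hjlt
      omega
    omega
  rw [hnil]
  simp

-- main invariant: from any run start pos, the zipped tails fold to A's outer loop
theorem pvMain (lst : List Int) :
    ∀ n pos (d : PySem.Dict Int Int), lst.length - pos ≤ n → pos ≤ lst.length →
      (pos < lst.length → pvStartP lst (pos : Int) = true) →
      (((PySem.List.pyRange (pos : Int) (lst.length : Int) 1).filter (pvStartP lst)).zip
        ((PySem.List.pyRange (pos : Int) (lst.length : Int) 1).filter (pvEndP lst))).foldl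
          (pvStepB lst) d
        = pvLoopA lst d pos := by
  intro n
  induction n with
  | zero =>
    intro pos d hn hle _
    have : pos = lst.length := by omega
    subst this
    rw [PySem.List.pyRange_one_eq_nil (by omega)]
    rw [pvLoopA]
    simp
  | succ n ih =>
    intro pos d hn hle hstart
    by_cases hpos : pos < lst.length
    · set entry := lst.getD pos 0 with hentrydef
      set j := pvRunEnd lst entry pos with hjdef
      have hjge : pos ≤ j := pvRunEnd_ge lst entry pos
      have hjlt : j < lst.length := pvRunEnd_lt lst entry pos hpos
      have hstop := pvRunEnd_stop lst entry pos
      rw [← hjdef] at hstop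
      have hsplit : PySem.List.pyRange (pos : Int) (lst.length : Int) 1
          = PySem.List.pyRange (pos : Int) (((j : Nat) : Int) + 1) 1
            ++ PySem.List.pyRange (((j : Nat) : Int) + 1) (lst.length : Int) 1 :=
        PySem.List.pyRange_one_append _ _ _ (by exact_mod_cast Nat.lt_succ_of_le hjge |>.le)
          (by exact_mod_cast hjlt)
      rw [hsplit, List.filter_append, List.filter_append]
      have hS : (PySem.List.pyRange (pos : Int) (((j : Nat) : Int) + 1) 1).filter (pvStartP lst)
          = [(pos : Int)] := by
        have := pvStartsSeg lst entry pos hpos rfl (hstart hpos)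
        rw [← hjdef] at this
        exact_mod_cast this
      have hE : (PySem.List.pyRange (pos : Int) (((j : Nat) : Int) + 1) 1).filter (pvEndP lst)
          = [((j : Nat) : Int)] := by
        have := pvEndsSeg lst entry pos hpos rfl
        rw [← hjdef] at this
        exact_mod_cast this
      rw [hS, hE]
      rw [List.singleton_append, List.singleton_append, List.zip_cons_cons, List.foldl_cons]
      have hstep : pvStepB lst d ((pos : Int), ((j : Nat) : Int))
          = d.insert entry (if j ≠ pos then ((j / 2 : Nat) : Int) else (j : Int)) := by
        unfold pvStepB
        have hget : PySem.List.pyGetD lst (pos : Int) 0 = entry := by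
          rw [pvGetD_int lst _ (by omega) (by exact_mod_cast hpos)]
          simpa using hentrydef.symm
        rw [hget]
        congr 1
        by_cases hjp : j = pos
        · simp [hjp]
        · have hne : ¬ (((pos : Nat) : Int) = ((j : Nat) : Int)) := by
            intro hc; exact hjp (by exact_mod_cast hc.symm)
          simp only [beq_iff_eq, hne, if_false, hjp, ne_eq, not_false_iff, if_true]
          exact_mod_cast PySem.Int.floordiv_natCast j 2
      rw [hstep]
      have hcast : ((j : Nat) : Int) + 1 = (((j + 1 : Nat)) : Int) := by push_cast; ring
      rw [hcast]
      have hstart' : j + 1 < lst.length → pvStartP lst ((j + 1 : Nat) : Int) = true := by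
        intro hlt
        have hne : lst.getD (j + 1) 0 ≠ entry := fun hc => hstop ⟨hlt, hc⟩
        have hj' : lst.getD j 0 = entry := pvRunEnd_run lst entry pos rfl j hjge (le_refl _)
        have e1 : PySem.List.pyGetD lst (((j + 1 : Nat) : Int) - 1) 0 = entry := by
          rw [pvGetD_int lst _ (by omega) (by
            have : ((j : Nat) : Int) < (lst.length : Int) := by exact_mod_cast hjlt
            push_cast
            omega)]
          have : (((j + 1 : Nat) : Int) - 1).toNat = j := by omega
          rw [this, hj']
        have e2 : PySem.List.pyGetD lst ((j + 1 : Nat) : Int) 0 = lst.getD (j + 1) 0 := by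
          rw [pvGetD_int lst _ (by omega) (by exact_mod_cast hlt)]
          simp
        simp only [pvStartP, Bool.or_eq_true, Bool.not_eq_true', beq_eq_false_iff_ne, ne_eq, e1, e2]
        exact Or.inr (fun hc => hne hc.symm)
      rw [ih (j + 1) _ (by omega) (by omega) hstart']
      conv_rhs => rw [pvLoopA]
      simp only [dif_pos hpos]
      simp only [← hentrydef, ← hjdef]
    · have : pos = lst.length := by omega
      subst this
      rw [PySem.List.pyRange_one_eq_nil (by omega)]
      rw [pvLoopA]
      simp

-- ===== VERDICT (by name: the statement is the Claim_ definition above) =====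
theorem CreateGmap_spec : Claim_equal_CreateGmap := by
  intro lst _
  unfold Spec_CreateGmap CreateGmap CreateGmap_alt
  have := pvMain lst lst.length 0 PySem.Dict.empty (by omega) (by omega)
    (by intro _; simp [pvStartP])
  simpa using (congrArg PySem.Dict.items this).symm
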